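-- pv_equiv track=rewrite | github.com/jeppelind/aoc19 | 4/part2.py | noMoreThanTwoMatchingAdjacentDigits
-- ===== SOURCE A (Python) =====
-- def noMoreThanTwoMatchingAdjacentDigits(numSequence):
--   numOfAdjacentDigits = 1
--   previous = numSequence[0]
--   for num in numSequence[1:]:
--     if num == previous:
--       numOfAdjacentDigits += 1
--     elif numOfAdjacentDigits == 2:
--       return True
--     else:
--       numOfAdjacentDigits = 1
--     previous = num
--   return numOfAdjacentDigits == 2
-- ===== SOURCE B (Python) =====
-- def noMoreThanTwoMatchingAdjacentDigits(numSequence):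
--   # Build the run-length encoding (value, length) of maximal adjacent runs,
--   # then ask whether any run has length exactly 2.
--   runs = []
--   for num in numSequence:
--     if runs and runs[-1][0] == num:
--       runs[-1][1] += 1
--     else:
--       runs.append([num, 1])
--   return any(length == 2 for _, length in runs)
-- ===== Notes on version B (the rewrite author's own statement) =====
-- stated objective: idiomatic
-- what changed: Replaces the previous/counter/elif early-return scan by first computing the run-length encoding of maximal adjacent runs and then checking whether any run has length exactly 2.
import Mathlib
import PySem

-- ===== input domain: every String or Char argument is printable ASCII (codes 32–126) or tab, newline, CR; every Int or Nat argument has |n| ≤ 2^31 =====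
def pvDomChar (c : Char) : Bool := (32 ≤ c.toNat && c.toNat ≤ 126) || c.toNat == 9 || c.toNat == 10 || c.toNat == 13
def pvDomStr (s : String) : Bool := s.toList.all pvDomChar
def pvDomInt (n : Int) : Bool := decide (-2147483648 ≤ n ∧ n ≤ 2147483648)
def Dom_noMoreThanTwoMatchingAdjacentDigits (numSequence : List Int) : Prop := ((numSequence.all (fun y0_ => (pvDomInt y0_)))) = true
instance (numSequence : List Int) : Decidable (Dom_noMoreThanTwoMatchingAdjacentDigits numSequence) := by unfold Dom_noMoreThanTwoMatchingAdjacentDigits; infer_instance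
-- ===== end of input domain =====

-- B computes the run-length encoding of adjacent runs first and then tests
-- for a run of length exactly 2, instead of A's running-counter scan with
-- early return; same cost, different decomposition.


-- ===== PORT A =====
-- A's loop over numSequence[1:] with state (previous, numOfAdjacentDigits) and early return
def noMoreThanTwoMatchingAdjacentDigitsLoopA (previous : Int) (numOfAdjacentDigits : Int) : List Int → Bool
  | [] => numOfAdjacentDigits == 2
  | num :: rest =>
    if num == previous then
      noMoreThanTwoMatchingAdjacentDigitsLoopA num (numOfAdjacentDigits + 1) rest
    else if numOfAdjacentDigits == 2 then
      true
    else
      noMoreThanTwoMatchingAdjacentDigitsLoopA num 1 rest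

def noMoreThanTwoMatchingAdjacentDigits (numSequence : List Int) : Bool :=
  match numSequence with
  | [] => false   -- numSequence[0] raises IndexError in Python; excluded by Pre_
  | previous :: rest => noMoreThanTwoMatchingAdjacentDigitsLoopA previous 1 rest

-- ===== PORT B =====
-- B's first pass: run-length encoding of maximal adjacent runs (runs[-1] update / append)
def noMoreThanTwoMatchingAdjacentDigitsRuns (numSequence : List Int) : List (Int × Int) :=
  numSequence.foldl
    (fun runs num =>
      match runs.getLast? with
      | some (v, c) => if v == num then runs.dropLast ++ [(v, c + 1)] else runs ++ [(num, 1)]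
      | none => [(num, 1)])
    []

def noMoreThanTwoMatchingAdjacentDigits_alt (numSequence : List Int) : Bool :=
  (noMoreThanTwoMatchingAdjacentDigitsRuns numSequence).any (fun r => r.2 == 2)

-- ===== PRECONDITION & SPEC =====
-- Pre_ excludes only the empty list, on which A raises IndexError (numSequence[0]).
def Pre_noMoreThanTwoMatchingAdjacentDigits (numSequence : List Int) : Prop := numSequence ≠ []
instance (numSequence : List Int) : Decidable (Pre_noMoreThanTwoMatchingAdjacentDigits numSequence) := by unfold Pre_noMoreThanTwoMatchingAdjacentDigits; infer_instance

def pvWitness_noMoreThanTwoMatchingAdjacentDigits : List Int := [1, 1, 2]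

def Spec_noMoreThanTwoMatchingAdjacentDigits (numSequence : List Int) (out : Bool) : Prop := out = noMoreThanTwoMatchingAdjacentDigits_alt numSequence
instance (numSequence : List Int) (out : Bool) : Decidable (Spec_noMoreThanTwoMatchingAdjacentDigits numSequence out) := by unfold Spec_noMoreThanTwoMatchingAdjacentDigits; infer_instance

-- ===== CLAIM (what is proved, stated in full; the proofs are below) =====
def Claim_equal_noMoreThanTwoMatchingAdjacentDigits : Prop := ∀ (numSequence : List Int), Dom_noMoreThanTwoMatchingAdjacentDigits numSequence → Pre_noMoreThanTwoMatchingAdjacentDigits numSequence → Spec_noMoreThanTwoMatchingAdjacentDigits numSequence (noMoreThanTwoMatchingAdjacentDigits numSequence)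


-- ===== LEMMAS AND PROOFS =====

-- The run-length encoding of "a current run (prev, count) followed by rest".
def runsFrom (prev count : Int) : List Int → List (Int × Int)
  | [] => [(prev, count)]
  | n :: rest => if n == prev then runsFrom prev (count + 1) rest else (prev, count) :: runsFrom n 1 rest

-- A's loop returns True iff some run of (current run ++ rest) has length exactly 2.
theorem loopA_eq_any (rest : List Int) : ∀ (prev count : Int),
    noMoreThanTwoMatchingAdjacentDigitsLoopA prev count rest
      = (runsFrom prev count rest).any (fun r => r.2 == 2) := by
  induction rest with
  | nil => intro prev count; simp [noMoreThanTwoMatchingAdjacentDigitsLoopA, runsFrom, List.any]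
  | cons n rest ih =>
    intro prev count
    by_cases h : n == prev
    · have he : n = prev := by simpa using h
      subst he
      simp [noMoreThanTwoMatchingAdjacentDigitsLoopA, runsFrom, ih]
    · by_cases hc : count == 2
      · simp [noMoreThanTwoMatchingAdjacentDigitsLoopA, runsFrom, h, hc]
      · simp [noMoreThanTwoMatchingAdjacentDigitsLoopA, runsFrom, h, hc, ih]

-- B's foldl extends an accumulator whose last run is (v, c) by runsFrom v c rest.
theorem foldl_runs (rest : List Int) : ∀ (acc : List (Int × Int)) (v c : Int),
    rest.foldl
      (fun runs num =>
        match runs.getLast? with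
        | some (w, d) => if w == num then runs.dropLast ++ [(w, d + 1)] else runs ++ [(num, 1)]
        | none => [(num, 1)])
      (acc ++ [(v, c)])
      = acc ++ runsFrom v c rest := by
  induction rest with
  | nil => intro acc v c; simp [runsFrom]
  | cons n rest ih =>
    intro acc v c
    by_cases h : v = n
    · subst h
      simp only [List.foldl_cons, List.getLast?_concat, runsFrom, beq_self_eq_true, if_true,
        List.dropLast_concat]
      exact ih acc v (c + 1)
    · have h1 : (v == n) = false := by simpa using h
      have h2 : (n == v) = false := by simpa using fun e => h e.symm
      simp only [List.foldl_cons, List.getLast?_concat, runsFrom, h1, h2,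
        List.append_assoc]
      have := ih (acc ++ [(v, c)]) n 1
      simpa [List.append_assoc] using this

theorem runs_cons (p : Int) (rest : List Int) :
    noMoreThanTwoMatchingAdjacentDigitsRuns (p :: rest) = runsFrom p 1 rest := by
  have := foldl_runs rest [] p 1
  simpa [noMoreThanTwoMatchingAdjacentDigitsRuns] using this

-- ===== VERDICT (by name: the statement is the Claim_ definition above) =====
theorem noMoreThanTwoMatchingAdjacentDigits_spec : Claim_equal_noMoreThanTwoMatchingAdjacentDigits := by
  intro numSequence _ hpre
  match numSequence with
  | [] => exact absurd rfl hpre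
  | p :: rest =>
    show noMoreThanTwoMatchingAdjacentDigits (p :: rest) = noMoreThanTwoMatchingAdjacentDigits_alt (p :: rest)
    simp [noMoreThanTwoMatchingAdjacentDigits, noMoreThanTwoMatchingAdjacentDigits_alt,
      runs_cons, loopA_eq_any]
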